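-- pv_equiv track=rewrite | github.com/CruelMarco/BioInf_SS_2024 | programming_course/assignments_01.py | kmer_decode
-- ===== SOURCE A (Python) =====
-- def kmer_decode(code, k):
--
--     kmer = ''
--
--     for i in range(k):
--
--         if code & 3 == 0:
--
--             kmer = 'A' + kmer
--
--         elif code & 3 == 1:
--
--             kmer = 'C' + kmer
--
--         elif code & 3 == 2:
--
--             kmer = 'G' + kmer
--
--         elif code & 3 == 3:
--
--             kmer = 'T' + kmer
--
--         code = code >> 2
--
--     return kmer
--
--     pass
-- ===== SOURCE B (Python) =====
-- MAP = 'ACGT'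
--
-- def kmer_decode(code, k):
--     return ''.join(MAP[(code >> (2 * (k - 1 - p))) & 3] for p in range(k))
-- ===== Notes on version B (the rewrite author's own statement) =====
-- stated objective: faster
-- what changed: B addresses each output position directly, extracting the 2-bit pair for position p by a shift from the unmutated code and building the string left-to-right with join, instead of A's loop that mutates code and prepends single characters (repeated prepend copies the string each iteration).
import Mathlib
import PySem

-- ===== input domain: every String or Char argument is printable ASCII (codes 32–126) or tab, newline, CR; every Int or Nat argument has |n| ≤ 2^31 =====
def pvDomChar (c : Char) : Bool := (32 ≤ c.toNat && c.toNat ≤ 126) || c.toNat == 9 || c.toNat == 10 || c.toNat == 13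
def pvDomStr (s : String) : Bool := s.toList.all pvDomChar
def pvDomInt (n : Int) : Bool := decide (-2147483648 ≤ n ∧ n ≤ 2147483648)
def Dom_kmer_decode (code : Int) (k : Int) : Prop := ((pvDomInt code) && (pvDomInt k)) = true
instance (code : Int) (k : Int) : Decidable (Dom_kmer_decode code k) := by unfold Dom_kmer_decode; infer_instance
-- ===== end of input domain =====

-- B re-decomposes A: each output character is computed positionally by a shift from the
-- unmutated code and the string is built left-to-right, instead of A's mutate-and-prepend loop.

-- ===== PORT A =====
-- Python's `code & 3` is exactly floor-mod by 4, and `code >> 2` is exactly floor-div by 4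
-- (arithmetic shift), for every int including negatives.  The string is built as a List Char
-- (prepend = cons) and packed by String.mk at the end.
def kmer_decode_loop : Int → Nat → List Char → List Char
  | _, 0, kmer => kmer
  | code, n + 1, kmer =>
    let kmer' :=
      if PySem.Int.mod code 4 = 0 then 'A' :: kmer
      else if PySem.Int.mod code 4 = 1 then 'C' :: kmer
      else if PySem.Int.mod code 4 = 2 then 'G' :: kmer
      else if PySem.Int.mod code 4 = 3 then 'T' :: kmer
      else kmer
    kmer_decode_loop (PySem.Int.floordiv code 4) n kmer'

def kmer_decode (code : Int) (k : Int) : String :=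
  String.mk (kmer_decode_loop code k.toNat [])

-- ===== PORT B =====
-- MAP = 'ACGT'
def pvMapACGT : List Char := ['A', 'C', 'G', 'T']

-- `code >> (2*(k-1-p))` for 0 ≤ p < k is floor-div by 2^(2*(k-1-p)); the index
-- `… & 3` always lies in [0,4), so Python's MAP[...] never raises (the .getD default is dead).
def kmer_decode_alt (code : Int) (k : Int) : String :=
  String.mk ((List.range k.toNat).map (fun p =>
    (PySem.List.pyGet? pvMapACGT
      (PySem.Int.mod (PySem.Int.floordiv code (2 ^ (2 * (k.toNat - 1 - p)))) 4)).getD 'A'))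

-- ===== PRECONDITION & SPEC =====
def Spec_kmer_decode (code : Int) (k : Int) (out : String) : Prop := out = kmer_decode_alt code k
instance (code : Int) (k : Int) (out : String) : Decidable (Spec_kmer_decode code k out) := by unfold Spec_kmer_decode; infer_instance

-- ===== CLAIM (what is proved, stated in full; the proofs are below) =====
def Claim_equal_kmer_decode : Prop := ∀ (code : Int) (k : Int), Dom_kmer_decode code k → Spec_kmer_decode code k (kmer_decode code k)

-- ===== LEMMAS AND PROOFS =====

-- the character A's if/elif chain produces for the low 2-bit pair of `code`
def pvChA (code : Int) : Char :=
  if PySem.Int.mod code 4 = 0 then 'A'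
  else if PySem.Int.mod code 4 = 1 then 'C'
  else if PySem.Int.mod code 4 = 2 then 'G'
  else 'T'

-- the list of characters A has produced after n iterations (high pair first)
def pvChars (code : Int) : Nat → List Char
  | 0 => []
  | n + 1 => pvChars (PySem.Int.floordiv code 4) n ++ [pvChA code]

theorem pvMod_eq_emod (code : Int) : PySem.Int.mod code 4 = code % 4 :=
  PySem.Int.mod_eq_emod_of_pos (by norm_num)

theorem pvMod4_cases (code : Int) :
    code % 4 = 0 ∨ code % 4 = 1 ∨ code % 4 = 2 ∨ code % 4 = 3 := by omega

theorem kmer_decode_loop_eq (n : Nat) :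
    ∀ (code : Int) (acc : List Char),
      kmer_decode_loop code n acc = pvChars code n ++ acc := by
  induction n with
  | zero => intro code acc; simp [kmer_decode_loop, pvChars]
  | succ n ih =>
    intro code acc
    have hstep :
        (if PySem.Int.mod code 4 = 0 then 'A' :: acc
         else if PySem.Int.mod code 4 = 1 then 'C' :: acc
         else if PySem.Int.mod code 4 = 2 then 'G' :: acc
         else if PySem.Int.mod code 4 = 3 then 'T' :: acc
         else acc) = pvChA code :: acc := by
      simp only [pvChA, pvMod_eq_emod]
      rcases pvMod4_cases code with h | h | h | h <;> simp only [h] <;> norm_num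
    simp only [kmer_decode_loop, hstep, ih, pvChars, List.append_assoc, List.cons_append,
      List.nil_append]

theorem pvFloordiv_one (a : Int) : PySem.Int.floordiv a 1 = a := by
  rw [PySem.Int.floordiv_eq_ediv_of_pos (by norm_num)]; exact Int.ediv_one a

theorem pvFloordiv_floordiv (a : Int) (b c : Int) (hb : 0 < b) (hc : 0 < c) :
    PySem.Int.floordiv (PySem.Int.floordiv a b) c = PySem.Int.floordiv a (b * c) := by
  rw [PySem.Int.floordiv_eq_ediv_of_pos hb, PySem.Int.floordiv_eq_ediv_of_pos hc,
    PySem.Int.floordiv_eq_ediv_of_pos (by positivity)]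
  exact Int.ediv_ediv_of_nonneg (le_of_lt hb)

theorem pvChA_eq_get (code : Int) :
    pvChA code = (PySem.List.pyGet? pvMapACGT (PySem.Int.mod code 4)).getD 'A' := by
  simp only [pvChA, pvMod_eq_emod]
  rcases pvMod4_cases code with h | h | h | h <;> simp only [h] <;> decide

theorem pvChars_eq_map (n : Nat) : ∀ (code : Int),
    pvChars code n = (List.range n).map (fun p =>
      (PySem.List.pyGet? pvMapACGT
        (PySem.Int.mod (PySem.Int.floordiv code (2 ^ (2 * (n - 1 - p)))) 4)).getD 'A') := by
  induction n with
  | zero => intro code; simp [pvChars]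
  | succ n ih =>
    intro code
    rw [List.range_succ, List.map_append]
    simp only [pvChars, ih (PySem.Int.floordiv code 4), List.map_cons, List.map_nil]
    congr 1
    · apply List.map_congr_left
      intro p hp
      have hp' : p < n := List.mem_range.mp hp
      have hexp : 2 * (n + 1 - 1 - p) = 2 * (n - 1 - p) + 2 := by omega
      rw [hexp, pow_add]
      rw [pvFloordiv_floordiv code 4 (2 ^ (2 * (n - 1 - p))) (by norm_num) (by positivity),
        mul_comm]
      norm_num
    · simp only [Nat.add_sub_cancel, Nat.sub_self, Nat.mul_zero, pow_zero, pvFloordiv_one,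
        pvChA_eq_get]

-- ===== VERDICT (by name: the statement is the Claim_ definition above) =====
theorem kmer_decode_spec : Claim_equal_kmer_decode := by
  intro code k _
  unfold Spec_kmer_decode kmer_decode kmer_decode_alt
  rw [kmer_decode_loop_eq, List.append_nil, pvChars_eq_map]
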